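-- pv_equiv track=rewrite | github.com/wil953742/Algorithm-Study | 실리콘/1.py | solution
-- ===== SOURCE A (Python) =====
-- from collections import deque
--
-- def solution(rows, columns, connections, queries):
--     answer = [0] * len(queries)
--     deq = deque(connections)
--
--     for l in range(len(queries)):
--       x_s, y_s, x_e, y_e = queries[l]
--
--       if x_s > x_e:
--         x_e, x_s = x_s, x_e
--
--       if y_s > y_e:
--         y_s, y_e = y_e, y_s
--
--       for _ in range(len(deq)):
--         connection = deq.popleft()
--         isPutAgain = True
--         x1, y1, x2, y2 = connection
--
--         if x1 > x2:
--           x1, x2 = x2, x1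
--
--         if y1 > y2:
--           y1, y2 = y2, y1
--
--         for i in range(x_s, x_e + 1):
--           for j in range(y_s, y_e + 1):
--
--             if (x1, y1) == (i, j) or (x2, y2) == (i, j):
--               if x1 < x_s or x2 > x_e or y1 < y_s or y2 > y_e:
--                 answer[l] += 1
--                 isPutAgain = False
--
--         if isPutAgain:
--           deq.append(connection)
--
--
--     return answer
-- ===== SOURCE B (Python) =====
-- def solution(rows, columns, connections, queries):
--     # Faster: per query, a single pass over the remaining connections with
--     # direct range checks on the bounding-box corners (no cell-by-cell scan).
--     answer = []
--     remaining = list(connections)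
--     for q in queries:
--         x_s, x_e = sorted((q[0], q[2]))
--         y_s, y_e = sorted((q[1], q[3]))
--         cnt = 0
--         kept = []
--         for c in remaining:
--             x1, x2 = sorted((c[0], c[2]))
--             y1, y2 = sorted((c[1], c[3]))
--             in1 = x_s <= x1 <= x_e and y_s <= y1 <= y_e
--             in2 = x_s <= x2 <= x_e and y_s <= y2 <= y_e
--             if in1 != in2:
--                 cnt += 1
--             else:
--                 kept.append(c)
--         remaining = kept
--         answer.append(cnt)
--     return answer
-- ===== Notes on version B (the rewrite author's own statement) =====
-- stated objective: faster
-- what changed: Replaced A's cell-by-cell scan of every query rectangle (testing each cell against both bounding-box corners of each connection) by a single pass per query over the remaining connections with direct range checks: a connection is counted and removed exactly when one of its two bounding-box corners lies in the rectangle and the other does not.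
import Mathlib
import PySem

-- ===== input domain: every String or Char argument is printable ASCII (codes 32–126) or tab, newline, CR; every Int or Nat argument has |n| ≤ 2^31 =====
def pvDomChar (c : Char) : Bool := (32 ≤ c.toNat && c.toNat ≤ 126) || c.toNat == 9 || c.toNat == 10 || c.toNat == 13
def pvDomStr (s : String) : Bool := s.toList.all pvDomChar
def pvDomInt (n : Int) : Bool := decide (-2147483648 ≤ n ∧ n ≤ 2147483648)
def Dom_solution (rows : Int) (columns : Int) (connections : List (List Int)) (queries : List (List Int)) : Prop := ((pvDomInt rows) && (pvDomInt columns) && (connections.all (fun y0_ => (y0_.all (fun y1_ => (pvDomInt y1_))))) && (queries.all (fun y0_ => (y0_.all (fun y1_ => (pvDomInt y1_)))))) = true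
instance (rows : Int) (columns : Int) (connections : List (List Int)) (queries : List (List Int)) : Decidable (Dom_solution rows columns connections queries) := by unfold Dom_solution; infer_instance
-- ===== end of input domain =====

-- B replaces A's cell-by-cell rectangle scan by direct in-rectangle range checks on the
-- two bounding-box corners of each connection (objective: faster, one pass per query).

-- ===== PORT A =====
-- helper: 'x_s, y_s, x_e, y_e = lst' for a 4-element list; Python raises ValueError
-- otherwise — those inputs are excluded by Pre_solution, the default is never claimed.
def pvAUnpack (xs : List Int) : Int × Int × Int × Int :=
  match xs with
  | [a, b, c, d] => (a, b, c, d)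
  | _ => (0, 0, 0, 0)

-- the two nested 'for i in range(x_s, x_e+1): for j in range(y_s, y_e+1)' cell loops,
-- threading (answer[l], isPutAgain)
def pvACells (x1 y1 x2 y2 xS yS xE yE : Int) (st : Int × Bool) : Int × Bool :=
  (PySem.List.pyRange xS (xE + 1) 1).foldl
    (fun st i =>
      (PySem.List.pyRange yS (yE + 1) 1).foldl
        (fun st j =>
          if (x1, y1) = (i, j) ∨ (x2, y2) = (i, j) then
            if x1 < xS ∨ x2 > xE ∨ y1 < yS ∨ y2 > yE then (st.1 + 1, false) else st
          else st)
        st)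
    st

-- the 'for _ in range(len(deq)): popleft …, conditional append' pass over the deque
def pvAQuery (xS yS xE yE : Int) (deq : List (List Int)) : Int × List (List Int) :=
  deq.foldl
    (fun (st : Int × List (List Int)) conn =>
      let u := pvAUnpack conn
      let x1 := u.1; let y1 := u.2.1; let x2 := u.2.2.1; let y2 := u.2.2.2
      let p := if x1 > x2 then (x2, x1) else (x1, x2)
      let q := if y1 > y2 then (y2, y1) else (y1, y2)
      let r := pvACells p.1 q.1 p.2 q.2 xS yS xE yE (st.1, true)
      (r.1, if r.2 then st.2 ++ [conn] else st.2))
    (0, [])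

def solution (rows : Int) (columns : Int) (connections : List (List Int)) (queries : List (List Int)) : List Int :=
  (queries.foldl
    (fun (st : List Int × List (List Int)) qu =>
      let u := pvAUnpack qu
      let xS0 := u.1; let yS0 := u.2.1; let xE0 := u.2.2.1; let yE0 := u.2.2.2
      let px := if xS0 > xE0 then (xE0, xS0) else (xS0, xE0)
      let py := if yS0 > yE0 then (yE0, yS0) else (yS0, yE0)
      let r := pvAQuery px.1 py.1 px.2 py.2 st.2
      (st.1 ++ [r.1], r.2))
    ([], connections)).1

-- ===== PORT B =====
-- helper: lst[i] — exact whenever the index is in range, which Pre_solution guarantees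
def pvBIdx (xs : List Int) (i : Int) : Int := PySem.List.pyGetD xs i 0

-- helper: 'a, b = sorted((u, v))' for a 2-tuple
def pvBSort2 (a b : Int) : Int × Int := if a ≤ b then (a, b) else (b, a)

-- one pass over 'remaining' for a fixed normalized query rectangle
def pvBQuery (xS yS xE yE : Int) (remaining : List (List Int)) : Int × List (List Int) :=
  remaining.foldl
    (fun (st : Int × List (List Int)) c =>
      let px := pvBSort2 (pvBIdx c 0) (pvBIdx c 2)
      let py := pvBSort2 (pvBIdx c 1) (pvBIdx c 3)
      let in1 := decide (xS ≤ px.1 ∧ px.1 ≤ xE ∧ yS ≤ py.1 ∧ py.1 ≤ yE)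
      let in2 := decide (xS ≤ px.2 ∧ px.2 ≤ xE ∧ yS ≤ py.2 ∧ py.2 ≤ yE)
      if in1 ≠ in2 then (st.1 + 1, st.2) else (st.1, st.2 ++ [c]))
    (0, [])

def pvBGo : List (List Int) → List (List Int) → List Int
  | [], _ => []
  | qu :: qs, remaining =>
    let px := pvBSort2 (pvBIdx qu 0) (pvBIdx qu 2)
    let py := pvBSort2 (pvBIdx qu 1) (pvBIdx qu 3)
    let r := pvBQuery px.1 py.1 px.2 py.2 remaining
    r.1 :: pvBGo qs r.2

def solution_alt (rows : Int) (columns : Int) (connections : List (List Int)) (queries : List (List Int)) : List Int :=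
  pvBGo queries connections

-- ===== PRECONDITION & SPEC =====
-- Pre_ excludes exactly the inputs on which A raises ValueError: a nonempty queries list
-- in which some query row, or some connection row, does not have exactly 4 entries
-- (with queries == [] A never unpacks anything and returns []).
def Pre_solution (rows : Int) (columns : Int) (connections : List (List Int)) (queries : List (List Int)) : Prop :=
  queries = [] ∨ ((∀ qu ∈ queries, qu.length = 4) ∧ (∀ c ∈ connections, c.length = 4))
instance (rows : Int) (columns : Int) (connections : List (List Int)) (queries : List (List Int)) : Decidable (Pre_solution rows columns connections queries) := by unfold Pre_solution; infer_instance

def pvWitness_solution : Int × Int × List (List Int) × List (List Int) :=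
  (3, 3, [[0, 0, 2, 2], [1, 1, 1, 1]], [[0, 0, 1, 1], [0, 0, 2, 2]])

def Spec_solution (rows : Int) (columns : Int) (connections : List (List Int)) (queries : List (List Int)) (out : List Int) : Prop := out = solution_alt rows columns connections queries
instance (rows : Int) (columns : Int) (connections : List (List Int)) (queries : List (List Int)) (out : List Int) : Decidable (Spec_solution rows columns connections queries out) := by unfold Spec_solution; infer_instance

-- ===== CLAIM (what is proved, stated in full; the proofs are below) =====
def Claim_equal_solution : Prop := ∀ (rows : Int) (columns : Int) (connections : List (List Int)) (queries : List (List Int)), Dom_solution rows columns connections queries → Pre_solution rows columns connections queries → Spec_solution rows columns connections queries (solution rows columns connections queries)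


-- ===== LEMMAS AND PROOFS =====

theorem pvFoldBump {α : Type} (p : α → Bool) (M : List α) (c : Int) (b : Bool) :
    M.foldl (fun st x => if p x then (st.1 + 1, false) else st) (c, b)
      = (c + (M.countP p : Int), b && (M.countP p == 0)) := by
  induction M generalizing c b with
  | nil => simp
  | cons x xs ih =>
    by_cases h : p x
    · simp only [List.foldl_cons, h, if_pos, List.countP_cons, ih]
      simp
      omega
    · simp [List.foldl_cons, h, ih]


theorem pvNestedBump (L M : List Int) (P : Int → Int → Bool) (c : Int) (b : Bool) :
    L.foldl (fun st i => M.foldl (fun st j => if P i j then (st.1 + 1, false) else st) st) (c, b)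
      = (c + ((L.flatMap (fun i => M.map (fun j => (i, j)))).countP (fun z => P z.1 z.2) : Int),
         b && ((L.flatMap (fun i => M.map (fun j => (i, j)))).countP (fun z => P z.1 z.2) == 0)) := by
  induction L generalizing c b with
  | nil => simp
  | cons i L ih =>
    simp only [List.foldl_cons, pvFoldBump (P i) M c b, ih, List.flatMap_cons,
      List.countP_append, List.countP_map]
    have : (fun z => P z.1 z.2) ∘ (fun j => (i, j)) = P i := rfl
    rw [this]
    refine Prod.ext ?_ ?_
    · simp; push_cast; ring
    · cases b <;> simp
      rw [Bool.eq_iff_iff]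
      simp [Nat.add_eq_zero_iff]


theorem pvCountPair {α : Type} [DecidableEq α] (L : List α) (h : L.Nodup) (u v : α) :
    L.countP (fun z => decide (z = u) || decide (z = v))
      = (if u ∈ L then 1 else 0) + (if v ∈ L ∧ v ≠ u then 1 else 0) := by
  induction L with
  | nil => simp
  | cons x xs ih =>
    rcases List.nodup_cons.mp h with ⟨hx, hxs⟩
    rw [List.countP_cons, ih hxs]
    by_cases hu : x = u <;> by_cases hv : x = v <;>
      simp_all [List.mem_cons] <;> split_ifs <;> simp_all <;> omega


theorem pvCellsNodup (L M : List Int) (hL : L.Nodup) (hM : M.Nodup) :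
    (L.flatMap (fun i => M.map (fun j => (i, j)))).Nodup := by
  rw [List.nodup_flatMap]
  refine ⟨fun i _ => hM.map (fun a b h => by simpa using h), ?_⟩
  refine hL.imp (fun {i i'} hne => ?_)
  intro z hz hz'
  simp only [List.mem_map] at hz hz'
  rcases hz with ⟨a, _, rfl⟩
  rcases hz' with ⟨b, _, hb⟩
  exact hne (by simpa using (congrArg Prod.fst hb).symm)


theorem pvCellsMem (L M : List Int) (z : Int × Int) :
    z ∈ L.flatMap (fun i => M.map (fun j => (i, j))) ↔ z.1 ∈ L ∧ z.2 ∈ M := by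
  cases z with
  | mk a b => simp [List.mem_flatMap, List.mem_map, and_comm]


theorem pvACells_char (x1 y1 x2 y2 xS yS xE yE : Int) (c : Int)
    (hx : x1 ≤ x2) (hy : y1 ≤ y2) :
    pvACells x1 y1 x2 y2 xS yS xE yE (c, true)
      = (if (decide (xS ≤ x1 ∧ x1 ≤ xE ∧ yS ≤ y1 ∧ y1 ≤ yE)
             ≠ decide (xS ≤ x2 ∧ x2 ≤ xE ∧ yS ≤ y2 ∧ y2 ≤ yE))
         then ((c + 1 : Int), false) else (c, true)) := by
  have hfun : (fun (st : Int × Bool) (i : Int) =>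
      (PySem.List.pyRange yS (yE + 1) 1).foldl
        (fun st j =>
          if (x1, y1) = (i, j) ∨ (x2, y2) = (i, j) then
            if x1 < xS ∨ x2 > xE ∨ y1 < yS ∨ y2 > yE then (st.1 + 1, false) else st
          else st) st)
    = (fun (st : Int × Bool) (i : Int) =>
      (PySem.List.pyRange yS (yE + 1) 1).foldl
        (fun st j =>
          if ((i, j) == ((x1, y1) : Int × Int) || (i, j) == ((x2, y2) : Int × Int))
              && decide (x1 < xS ∨ x2 > xE ∨ y1 < yS ∨ y2 > yE)
          then (st.1 + 1, false) else st) st) := by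
    funext st i
    congr 1
    funext st j
    by_cases hp : (x1, y1) = (i, j) ∨ (x2, y2) = (i, j)
    · by_cases hc : x1 < xS ∨ x2 > xE ∨ y1 < yS ∨ y2 > yE
      · have hb1 : ((i, j) == ((x1, y1) : Int × Int) || (i, j) == ((x2, y2) : Int × Int)) = true := by
          rcases hp with h | h <;> simp [← h]
        rw [if_pos hp, if_pos hc]
        simp [hb1, hc]
      · simp [hc]
    · have hb1 : ((i, j) == ((x1, y1) : Int × Int) || (i, j) == ((x2, y2) : Int × Int)) = false := by
        push_neg at hp
        simp only [Bool.or_eq_false_iff, beq_eq_false_iff_ne, ne_eq]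
        exact ⟨fun h => hp.1 h.symm, fun h => hp.2 h.symm⟩
      rw [if_neg hp]
      simp [hb1]
  unfold pvACells
  rw [hfun, pvNestedBump]
  set cells := (PySem.List.pyRange xS (xE + 1) 1).flatMap
      (fun i => (PySem.List.pyRange yS (yE + 1) 1).map (fun j => (i, j))) with hcells
  by_cases hC : x1 < xS ∨ x2 > xE ∨ y1 < yS ∨ y2 > yE
  · -- crossing: count corners in the rectangle, at most one can be inside
    have hcnt : cells.countP (fun z => ((z.1, z.2) == ((x1, y1) : Int × Int) || (z.1, z.2) == ((x2, y2) : Int × Int)) && decide (x1 < xS ∨ x2 > xE ∨ y1 < yS ∨ y2 > yE))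
        = cells.countP (fun z => decide (z = ((x1, y1) : Int × Int)) || decide (z = ((x2, y2) : Int × Int))) := by
      apply List.countP_congr
      intro z _
      simp [hC]
    have hnd : cells.Nodup :=
      pvCellsNodup _ _ (PySem.List.nodup_pyRange_one _ _) (PySem.List.nodup_pyRange_one _ _)
    have hmem1 : ((x1, y1) : Int × Int) ∈ cells ↔ (xS ≤ x1 ∧ x1 ≤ xE ∧ yS ≤ y1 ∧ y1 ≤ yE) := by
      rw [pvCellsMem]
      simp only [PySem.List.mem_pyRange_one]
      omega
    have hmem2 : ((x2, y2) : Int × Int) ∈ cells ↔ (xS ≤ x2 ∧ x2 ≤ xE ∧ yS ≤ y2 ∧ y2 ≤ yE) := by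
      rw [pvCellsMem]
      simp only [PySem.List.mem_pyRange_one]
      omega
    rw [hcnt, pvCountPair cells hnd]
    by_cases h1 : xS ≤ x1 ∧ x1 ≤ xE ∧ yS ≤ y1 ∧ y1 ≤ yE <;>
      by_cases h2 : xS ≤ x2 ∧ x2 ≤ xE ∧ yS ≤ y2 ∧ y2 ≤ yE
    · exact absurd hC (by omega)
    · rw [if_pos (hmem1.mpr h1), if_neg (fun hm => h2 (hmem2.mp hm.1))]
      simp [h1, h2]
    · have hne : ((x2, y2) : Int × Int) ≠ ((x1, y1) : Int × Int) := by
        intro h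
        simp only [Prod.mk.injEq] at h
        omega
      rw [if_neg (fun hm => h1 (hmem1.mp hm)), if_pos ⟨hmem2.mpr h2, hne⟩]
      simp [h1, h2]
    · rw [if_neg (fun hm => h1 (hmem1.mp hm)), if_neg (fun hm => h2 (hmem2.mp hm.1))]
      simp [h1, h2]
  · -- fully inside: no cell ever fires, and both corners are inside
    have hcnt : cells.countP (fun z => ((z.1, z.2) == ((x1, y1) : Int × Int) || (z.1, z.2) == ((x2, y2) : Int × Int)) && decide (x1 < xS ∨ x2 > xE ∨ y1 < yS ∨ y2 > yE)) = 0 := by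
      apply List.countP_eq_zero.mpr
      intro z _
      simp [hC]
    have h1 : xS ≤ x1 ∧ x1 ≤ xE ∧ yS ≤ y1 ∧ y1 ≤ yE := by omega
    have h2 : xS ≤ x2 ∧ x2 ≤ xE ∧ yS ≤ y2 ∧ y2 ≤ yE := by omega
    simp [hcnt, h1, h2]


theorem pvQuery_eq (xS yS xE yE : Int) (deq : List (List Int))
    (hd : ∀ c ∈ deq, c.length = 4) :
    pvAQuery xS yS xE yE deq = pvBQuery xS yS xE yE deq := by
  unfold pvAQuery pvBQuery
  apply PySem.List.foldl_congr_mem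
  intro st conn hconn
  have h4 := hd conn hconn
  rcases conn with _ | ⟨a, conn⟩; · simp at h4
  rcases conn with _ | ⟨b, conn⟩; · simp at h4
  rcases conn with _ | ⟨cc, conn⟩; · simp at h4
  rcases conn with _ | ⟨d, conn⟩; · simp at h4
  rcases conn with _ | ⟨e, conn⟩
  swap; · simp at h4
  have h0 : pvBIdx [a, b, cc, d] 0 = a := by rw [pvBIdx, PySem.List.pyGetD_ofNat']; rfl
  have h1 : pvBIdx [a, b, cc, d] 1 = b := by rw [pvBIdx, PySem.List.pyGetD_ofNat']; rfl
  have h2 : pvBIdx [a, b, cc, d] 2 = cc := by rw [pvBIdx, PySem.List.pyGetD_ofNat']; rfl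
  have h3 : pvBIdx [a, b, cc, d] 3 = d := by rw [pvBIdx, PySem.List.pyGetD_ofNat']; rfl
  simp only [pvAUnpack, h0, h1, h2, h3]
  have hsx : (if a > cc then (cc, a) else (a, cc)) = pvBSort2 a cc := by
    unfold pvBSort2; split_ifs <;> first | rfl | omega
  have hsy : (if b > d then (d, b) else (b, d)) = pvBSort2 b d := by
    unfold pvBSort2; split_ifs <;> first | rfl | omega
  simp only [hsx, hsy]
  have hxle : (pvBSort2 a cc).1 ≤ (pvBSort2 a cc).2 := by unfold pvBSort2; split_ifs <;> simp <;> omega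
  have hyle : (pvBSort2 b d).1 ≤ (pvBSort2 b d).2 := by unfold pvBSort2; split_ifs <;> simp <;> omega
  rw [pvACells_char _ _ _ _ _ _ _ _ _ hxle hyle]
  split_ifs <;> simp_all


theorem pvBQuery_sub (xS yS xE yE : Int) (deq : List (List Int)) :
    ∀ c ∈ (pvBQuery xS yS xE yE deq).2, c ∈ deq := by
  unfold pvBQuery
  suffices h : ∀ (cnt : Int) (l0 : List (List Int)), ∀ c ∈ (deq.foldl
      (fun (st : Int × List (List Int)) c =>
        let px := pvBSort2 (pvBIdx c 0) (pvBIdx c 2)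
        let py := pvBSort2 (pvBIdx c 1) (pvBIdx c 3)
        let in1 := decide (xS ≤ px.1 ∧ px.1 ≤ xE ∧ yS ≤ py.1 ∧ py.1 ≤ yE)
        let in2 := decide (xS ≤ px.2 ∧ px.2 ≤ xE ∧ yS ≤ py.2 ∧ py.2 ≤ yE)
        if in1 ≠ in2 then (st.1 + 1, st.2) else (st.1, st.2 ++ [c])) (cnt, l0)).2,
      c ∈ l0 ∨ c ∈ deq by
    intro c hc
    rcases h 0 [] c hc with h' | h'
    · simp at h'
    · exact h'
  induction deq with
  | nil => intro cnt l0 c hc; exact Or.inl hc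
  | cons x xs ih =>
    intro cnt l0 c hc
    simp only [List.foldl_cons] at hc
    split_ifs at hc with hsplit
    · rcases ih _ _ c hc with h' | h'
      · exact Or.inl h'
      · exact Or.inr (List.mem_cons_of_mem _ h')
    · rcases ih _ _ c hc with h' | h'
      · rcases List.mem_append.mp h' with h'' | h''
        · exact Or.inl h''
        · exact Or.inr (List.mem_cons.mpr (Or.inl (List.mem_singleton.mp h'')))
      · exact Or.inr (List.mem_cons_of_mem _ h')


theorem pvMain (qs : List (List Int)) : ∀ (deq : List (List Int)),
    (∀ qu ∈ qs, qu.length = 4) → (∀ c ∈ deq, c.length = 4) → ∀ (acc : List Int),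
    (qs.foldl
      (fun (st : List Int × List (List Int)) qu =>
        let u := pvAUnpack qu
        let xS0 := u.1; let yS0 := u.2.1; let xE0 := u.2.2.1; let yE0 := u.2.2.2
        let px := if xS0 > xE0 then (xE0, xS0) else (xS0, xE0)
        let py := if yS0 > yE0 then (yE0, yS0) else (yS0, yE0)
        let r := pvAQuery px.1 py.1 px.2 py.2 st.2
        (st.1 ++ [r.1], r.2))
      (acc, deq)).1 = acc ++ pvBGo qs deq := by
  induction qs with
  | nil => intro deq hq hd acc; simp [pvBGo]
  | cons qu qs ih =>
    intro deq hq hd acc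
    have h4 := hq qu (List.mem_cons_self ..)
    rcases qu with _ | ⟨a, qu⟩; · simp at h4
    rcases qu with _ | ⟨b, qu⟩; · simp at h4
    rcases qu with _ | ⟨cc, qu⟩; · simp at h4
    rcases qu with _ | ⟨d, qu⟩; · simp at h4
    rcases qu with _ | ⟨e, qu⟩
    swap; · simp at h4
    have h0 : pvBIdx [a, b, cc, d] 0 = a := by rw [pvBIdx, PySem.List.pyGetD_ofNat']; rfl
    have h1 : pvBIdx [a, b, cc, d] 1 = b := by rw [pvBIdx, PySem.List.pyGetD_ofNat']; rfl
    have h2 : pvBIdx [a, b, cc, d] 2 = cc := by rw [pvBIdx, PySem.List.pyGetD_ofNat']; rfl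
    have h3 : pvBIdx [a, b, cc, d] 3 = d := by rw [pvBIdx, PySem.List.pyGetD_ofNat']; rfl
    have hsx : (if a > cc then (cc, a) else (a, cc)) = pvBSort2 a cc := by
      unfold pvBSort2; split_ifs <;> first | rfl | omega
    have hsy : (if b > d then (d, b) else (b, d)) = pvBSort2 b d := by
      unfold pvBSort2; split_ifs <;> first | rfl | omega
    rw [List.foldl_cons]
    have hstep :
        (let u := pvAUnpack [a, b, cc, d];
         let xS0 := u.1;
         let yS0 := u.2.1;
         let xE0 := u.2.2.1;
         let yE0 := u.2.2.2;
         let px := if xS0 > xE0 then (xE0, xS0) else (xS0, xE0);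
         let py := if yS0 > yE0 then (yE0, yS0) else (yS0, yE0);
         let r := pvAQuery px.1 py.1 px.2 py.2 ((acc, deq) : List Int × List (List Int)).2;
         (((acc, deq) : List Int × List (List Int)).1 ++ [r.1], r.2))
        = (acc ++ [(pvBQuery (pvBSort2 a cc).1 (pvBSort2 b d).1 (pvBSort2 a cc).2 (pvBSort2 b d).2 deq).1],
           (pvBQuery (pvBSort2 a cc).1 (pvBSort2 b d).1 (pvBSort2 a cc).2 (pvBSort2 b d).2 deq).2) := by
      simp only [pvAUnpack, hsx, hsy]
      rw [pvQuery_eq _ _ _ _ deq hd]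
    rw [hstep]
    rw [ih _ (fun q hq' => hq q (List.mem_cons_of_mem _ hq'))
        (fun c hc => hd c (pvBQuery_sub _ _ _ _ deq c hc))]
    simp [pvBGo, h0, h1, h2, h3]

-- ===== VERDICT (by name: the statement is the Claim_ definition above) =====
theorem solution_spec : Claim_equal_solution := by
  intro rows columns connections queries _hDom hPre
  unfold Spec_solution
  rcases hPre with h | ⟨hq, hd⟩
  · subst h; rfl
  · show solution rows columns connections queries = _
    unfold solution solution_alt
    simpa using pvMain queries connections hq hd []
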